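-- pv_equiv track=rewrite | github.com/intelligenceafa-cloud/Auto-Prov | candidate_edge_extractor/ATLAS/ablation/consistency_utils.py | get_consistent_vanetype
-- ===== SOURCE A (Python) =====
-- from collections import defaultdict, Counter
--
-- def get_consistent_vanetype(iterations):
--     id_value_counts = defaultdict(lambda: Counter())
--     only_none_ids = set()
--     for iteration in iterations:
--         pairs = [line.strip() for line in iteration.strip().split('\n') if '=' in line]
--         for pair in pairs:
--             key, value = map(str.strip, pair.split('=', 1))
--             value = value.lower()
--             clean_key = key.replace('"', '').replace("'", '').replace("{", '').replace("}", '').replace(")", '').replace("()", '')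
--             clean_value = value.replace('"', '').replace("'", '').replace("{", '')
--             if clean_value == "NONE":
--                 if clean_key not in id_value_counts:
--                     only_none_ids.add(clean_key)
--             else:
--                 only_none_ids.discard(clean_key)
--                 id_value_counts[clean_key][clean_value] += 1
--     consistent_output = {}
--     for key in set(id_value_counts.keys()).union(only_none_ids):
--         if key in only_none_ids:
--             consistent_output[key] = "NONE"
--         else:
--             most_common = id_value_counts[key].most_common()
--             max_count = most_common[0][1]
--             top_values = [val.lower() for val, count in most_common if count == max_count]
--             consistent_output[key] = top_values[0]
--     return consistent_output
-- ===== SOURCE B (Python) =====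
-- from collections import Counter
--
--
-- def _clean_key(k):
--     return k.replace('"', '').replace("'", '').replace('{', '').replace('}', '').replace(')', '').replace('()', '')
--
--
-- def _clean_value(v):
--     return v.replace('"', '').replace("'", '').replace('{', '')
--
--
-- def get_consistent_vanetype(iterations):
--     # Gather every cleaned value per cleaned key, in encounter order.
--     groups = {}
--     for iteration in iterations:
--         for line in iteration.strip().split('\n'):
--             if '=' in line:
--                 key, value = line.strip().split('=', 1)
--                 k = _clean_key(key.strip())
--                 v = _clean_value(value.strip().lower())
--                 groups.setdefault(k, []).append(v)
--     # Second pass: the mode of each key's values, ties broken toward the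
--     # first-encountered value (max returns the first maximal item).
--     result = {}
--     for k, vals in groups.items():
--         result[k] = max(Counter(vals).items(), key=lambda kv: kv[1])[0]
--     return result
-- ===== Notes on version B (the rewrite author's own statement) =====
-- stated objective: simpler
-- what changed: Single gather pass into a dict of per-key value lists (no Counter-per-key updates, no only-NONE set, whose branch is provably dead because values are lowercased before the comparison with 'NONE'), then a separate tally pass that picks each key's mode with a first-maximum scan over Counter items instead of Counter.most_common()'s sort-then-filter.
import Mathlib
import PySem

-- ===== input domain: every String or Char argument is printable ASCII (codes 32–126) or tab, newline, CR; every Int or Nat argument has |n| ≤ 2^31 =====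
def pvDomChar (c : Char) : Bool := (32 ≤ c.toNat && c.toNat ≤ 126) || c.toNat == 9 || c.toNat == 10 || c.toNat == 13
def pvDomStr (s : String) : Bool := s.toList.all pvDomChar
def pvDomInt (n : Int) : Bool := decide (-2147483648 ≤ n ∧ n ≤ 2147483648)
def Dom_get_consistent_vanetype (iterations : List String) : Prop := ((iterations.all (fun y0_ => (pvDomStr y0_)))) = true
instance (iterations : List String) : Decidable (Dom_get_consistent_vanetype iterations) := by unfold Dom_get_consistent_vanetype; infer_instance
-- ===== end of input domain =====

-- ===== PORT A =====
-- Literal port of A: dict-of-Counters + only-NONE set built while parsing,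
-- then Counter.most_common() (a stable descending sort) to pick each key's value.
def get_consistent_vanetype (iterations : List String) : List (String × String) :=
  let st := iterations.foldl
    (fun (st : PySem.Dict String (PySem.Dict String Int) × PySem.Set String) iteration =>
      let pairs := (((PySem.Str.split? (PySem.Str.strip iteration) "\n").getD []).filter
          (fun line => PySem.Str.isIn "=" line)).map (fun line => PySem.Str.strip line)
      pairs.foldl (fun st pair =>
        let parts := (PySem.Str.splitMax? pair "=" 1).getD []
        let key := PySem.Str.strip (parts.getD 0 "")
        let value := PySem.Str.lower (PySem.Str.strip (parts.getD 1 ""))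
        let clean_key := PySem.Str.replace (PySem.Str.replace (PySem.Str.replace
          (PySem.Str.replace (PySem.Str.replace (PySem.Str.replace key "\"" "")
            "'" "") "{" "") "}" "") ")" "") "()" ""
        let clean_value := PySem.Str.replace (PySem.Str.replace (PySem.Str.replace value
          "\"" "") "'" "") "{" ""
        if clean_value == "NONE" then
          (if st.1.contains clean_key then st else (st.1, PySem.Set.add st.2 clean_key))
        else
          (st.1.modify clean_key PySem.Dict.empty (fun c => c.modify clean_value 0 (· + 1)),
           PySem.Set.discard st.2 clean_key)) st)
    (PySem.Dict.empty, PySem.Set.empty)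
  let keyset : PySem.Set String := PySem.Set.union (PySem.Set.ofList st.1.keys) st.2
  (keyset.foldl (fun (out : PySem.Dict String String) key =>
    if PySem.Set.contains st.2 key then out.insert key "NONE"
    else
      let most_common := PySem.List.sorted (st.1.getD key PySem.Dict.empty).items
        (fun kv => kv.2) true
      let max_count := (most_common.getD 0 ("", 0)).2
      let top_values := (most_common.filter (fun kv => kv.2 == max_count)).map
        (fun kv => PySem.Str.lower kv.1)
      out.insert key (top_values.getD 0 "")) PySem.Dict.empty).items

-- ===== PORT B =====
-- B-side helpers (Source B's _clean_key / _clean_value and its mode expression)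
def pvCleanKey (k : String) : String :=
  PySem.Str.replace (PySem.Str.replace (PySem.Str.replace (PySem.Str.replace
    (PySem.Str.replace (PySem.Str.replace k "\"" "") "'" "") "{" "") "}" "") ")" "") "()" ""

def pvCleanValue (v : String) : String :=
  PySem.Str.replace (PySem.Str.replace (PySem.Str.replace v "\"" "") "'" "") "{" ""

-- max(Counter(vals).items(), key=lambda kv: kv[1])[0]
def pvMode (vals : List String) : String :=
  (PySem.List.maxD (PySem.Dict.counter vals).items (fun kv => kv.2) ("", 0)).1

-- Port of B: one gather pass into key -> list of values, then a tally pass.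
def get_consistent_vanetype_alt (iterations : List String) : List (String × String) :=
  let groups := iterations.foldl
    (fun (g : PySem.Dict String (List String)) iteration =>
      ((PySem.Str.split? (PySem.Str.strip iteration) "\n").getD []).foldl (fun g line =>
        if PySem.Str.isIn "=" line then
          let parts := (PySem.Str.splitMax? (PySem.Str.strip line) "=" 1).getD []
          let k := pvCleanKey (PySem.Str.strip (parts.getD 0 ""))
          let v := pvCleanValue (PySem.Str.lower (PySem.Str.strip (parts.getD 1 "")))
          g.modify k [] (fun l => l ++ [v])
        else g) g) PySem.Dict.empty
  (groups.items.foldl (fun (out : PySem.Dict String String) kv =>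
    out.insert kv.1 (pvMode kv.2)) PySem.Dict.empty).items

-- ===== PRECONDITION & SPEC =====
def Spec_get_consistent_vanetype (iterations : List String) (out : List (String × String)) : Prop := out = get_consistent_vanetype_alt iterations
instance (iterations : List String) (out : List (String × String)) : Decidable (Spec_get_consistent_vanetype iterations out) := by unfold Spec_get_consistent_vanetype; infer_instance

-- ===== CLAIM (what is proved, stated in full; the proofs are below) =====
def Claim_equal_get_consistent_vanetype : Prop := ∀ (iterations : List String), Dom_get_consistent_vanetype iterations → Spec_get_consistent_vanetype iterations (get_consistent_vanetype iterations)

-- ===== LEMMAS AND PROOFS =====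

-- Shared shapes of the computation (proof-only definitions)
def pvParse (line : String) : String × String :=
  let parts := (PySem.Str.splitMax? (PySem.Str.strip line) "=" 1).getD []
  (pvCleanKey (PySem.Str.strip (parts.getD 0 "")),
   pvCleanValue (PySem.Str.lower (PySem.Str.strip (parts.getD 1 ""))))

def pvLines (it : String) : List String :=
  ((PySem.Str.split? (PySem.Str.strip it) "
").getD []).filter (fun l => PySem.Str.isIn "=" l)

def pvPairs (its : List String) : List (String × String) :=
  (its.flatMap pvLines).map pvParse

def pvFA (st : PySem.Dict String (PySem.Dict String Int) × PySem.Set String)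
    (q : String × String) : PySem.Dict String (PySem.Dict String Int) × PySem.Set String :=
  if q.2 == "NONE" then
    (if st.1.contains q.1 then st else (st.1, PySem.Set.add st.2 q.1))
  else
    (st.1.modify q.1 PySem.Dict.empty (fun c => c.modify q.2 0 (· + 1)),
     PySem.Set.discard st.2 q.1)

def pvC (ps : List (String × String)) : PySem.Dict String (PySem.Dict String Int) :=
  ps.foldl (fun d q => d.modify q.1 PySem.Dict.empty (fun c => c.modify q.2 0 (· + 1)))
    PySem.Dict.empty

def pvD (ps : List (String × String)) : PySem.Dict String (List String) :=
  ps.foldl (fun g q => g.modify q.1 [] (fun l => l ++ [q.2])) PySem.Dict.empty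

def pvModeA (c : PySem.Dict String Int) : String :=
  let most_common := PySem.List.sorted c.items (fun kv => kv.2) true
  let max_count := (most_common.getD 0 ("", 0)).2
  ((most_common.filter (fun kv => kv.2 == max_count)).map
    (fun kv => PySem.Str.lower kv.1)).getD 0 ""

-- ---- character-level facts: lowercased strings stay lowercase ----

theorem pv_isupper_lowerChar (c : Char) :
    PySem.Chars.isupper (PySem.Chars.lowerChar c) = false := by
  unfold PySem.Chars.lowerChar
  split_ifs with h
  · simp only [PySem.Chars.isupper, Bool.and_eq_true, decide_eq_true_eq, Char.le_def,
      UInt32.le_iff_toNat_le] at h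
    have hv : (c.toNat + 32).isValidChar := by
      unfold Nat.isValidChar; left
      have h2 : c.toNat ≤ 90 := h.2
      omega
    simp only [PySem.Chars.isupper, Char.le_def, UInt32.le_iff_toNat_le,
      Bool.and_eq_false_iff, decide_eq_false_iff_not, not_le]
    right
    show 90 < (Char.ofNat (c.toNat + 32)).toNat
    rw [Char.toNat_ofNat, if_pos hv]
    have h1 : 65 ≤ c.toNat := h.1
    omega
  · simpa [PySem.Chars.isupper] using h

theorem pv_lowerChar_fixed {c : Char} (h : PySem.Chars.isupper c = false) :
    PySem.Chars.lowerChar c = c := by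
  unfold PySem.Chars.lowerChar
  simp [h]

-- replacing a substring by "" introduces no new characters
theorem pv_mem_replace_go (old : List Char) :
    ∀ (fuel : Nat) (l acc : List Char) (c : Char),
      c ∈ PySem.Chars.replace.go old [] fuel l acc → c ∈ acc ∨ c ∈ l := by
  intro fuel
  induction fuel with
  | zero =>
    intro l acc c h
    simp only [PySem.Chars.replace.go, List.mem_append, List.mem_reverse] at h
    exact h
  | succ n ih =>
    intro l acc c h
    cases l with
    | nil =>
      simp only [PySem.Chars.replace.go, List.mem_reverse] at h
      exact Or.inl h
    | cons hd t =>
      simp only [PySem.Chars.replace.go] at h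
      split_ifs at h with hp
      · rcases ih _ _ c h with h' | h'
        · simp only [List.reverse_nil, List.nil_append] at h'
          exact Or.inl h'
        · exact Or.inr (List.mem_of_mem_drop h')
      · rcases ih _ _ c h with h' | h'
        · rcases List.mem_cons.mp h' with h'' | h''
          · exact Or.inr (List.mem_cons.mpr (Or.inl h''))
          · exact Or.inl h''
        · exact Or.inr (List.mem_cons.mpr (Or.inr h'))

theorem pv_mem_replace_nil (s old : List Char) (c : Char)
    (h : c ∈ PySem.Chars.replace s old []) : c ∈ s := by
  unfold PySem.Chars.replace at h
  split_ifs at h with he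
  · simp only [List.nil_append, List.mem_flatMap, List.mem_cons, List.not_mem_nil,
      or_false] at h
    obtain ⟨d, hd, rfl⟩ := h
    exact hd
  · rcases pv_mem_replace_go old s.length s [] c h with h' | h'
    · cases h'
    · exact h'

theorem pv_mem_str_replace_nil (s : String) (old : String) (c : Char)
    (h : c ∈ (PySem.Str.replace s old "").toList) : c ∈ s.toList := by
  rw [PySem.Str.toList_replace] at h
  exact pv_mem_replace_nil _ _ _ h

-- every character of a cleaned value is non-uppercase
theorem pv_cleanValue_low (s : String) :
    ∀ c ∈ (pvCleanValue (PySem.Str.lower s)).toList, PySem.Chars.isupper c = false := by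
  intro c hc
  unfold pvCleanValue at hc
  have hc := pv_mem_str_replace_nil _ _ _ hc
  have hc := pv_mem_str_replace_nil _ _ _ hc
  have hc := pv_mem_str_replace_nil _ _ _ hc
  rw [PySem.Str.toList_lower] at hc
  unfold PySem.Chars.lower at hc
  obtain ⟨d, _, rfl⟩ := List.mem_map.mp hc
  exact pv_isupper_lowerChar d

theorem pv_lower_cleanValue (s : String) :
    PySem.Str.lower (pvCleanValue (PySem.Str.lower s)) = pvCleanValue (PySem.Str.lower s) := by
  apply String.toList_inj.mp
  rw [PySem.Str.toList_lower]
  unfold PySem.Chars.lower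
  calc List.map PySem.Chars.lowerChar (pvCleanValue (PySem.Str.lower s)).toList
      = List.map id (pvCleanValue (PySem.Str.lower s)).toList :=
        List.map_congr_left (fun c hc => pv_lowerChar_fixed (pv_cleanValue_low s c hc))
    _ = (pvCleanValue (PySem.Str.lower s)).toList := List.map_id _

theorem pv_cleanValue_ne_NONE (s : String) :
    (pvCleanValue (PySem.Str.lower s) == "NONE") = false := by
  rw [beq_eq_false_iff_ne]
  intro h
  have hN : 'N' ∈ (pvCleanValue (PySem.Str.lower s)).toList := by
    rw [h]; decide
  have hfalse := pv_cleanValue_low s 'N' hN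
  have htrue : PySem.Chars.isupper 'N' = true := by decide
  rw [htrue] at hfalse
  cases hfalse

-- ---- head of a stable descending sort = Python's max ----

theorem pv_head?_insertBy {α κ : Type} [LT κ] [DecidableLT κ] (key : α → κ) (x : α)
    (acc : List α) :
    (PySem.List.insertBy (fun a b => decide (key b < key a)) x acc).head? =
      match acc.head? with
      | none => some x
      | some m => if key m < key x then some x else some m := by
  cases acc with
  | nil => rfl
  | cons y ys =>
    show (if decide (key y < key x) = true then x :: y :: ys
          else y :: PySem.List.insertBy _ x ys).head? = _
    by_cases h : key y < key x <;> simp [h]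

theorem pv_head?_foldl_insertBy {α κ : Type} [LT κ] [DecidableLT κ] (key : α → κ) :
    ∀ (xs acc : List α),
      (xs.foldl (fun a x => PySem.List.insertBy (fun a b => decide (key b < key a)) x a)
        acc).head? =
      xs.foldl (fun m x =>
        match m with
        | none => some x
        | some m' => if key m' < key x then some x else some m') acc.head? := by
  intro xs
  induction xs with
  | nil => intro acc; rfl
  | cons x t ih =>
    intro acc
    simp only [List.foldl_cons]
    rw [ih, pv_head?_insertBy]

theorem pv_max?_eq_head?_sorted {α κ : Type} [LT κ] [DecidableLT κ] (xs : List α)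
    (key : α → κ) :
    PySem.List.max? xs key = (PySem.List.sorted xs key true).head? := by
  rw [PySem.List.sorted_rev_eq_foldl_insertBy, pv_head?_foldl_insertBy]
  rfl

-- A's most_common()[0]-style selection equals B's max-scan, on lowercase values
theorem pv_mode_eq (vals : List String) (hne : vals ≠ [])
    (hlow : ∀ v ∈ vals, PySem.Str.lower v = v) :
    pvModeA (PySem.Dict.counter vals) = pvMode vals := by
  unfold pvModeA pvMode PySem.List.maxD
  rw [pv_max?_eq_head?_sorted]
  have hxs : (PySem.Dict.counter vals).items ≠ [] := by
    rw [PySem.Dict.items_counter]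
    obtain ⟨v, t, rfl⟩ := List.exists_cons_of_ne_nil hne
    have hv : v ∈ PySem.Set.ofList (v :: t) := (PySem.Set.mem_ofList _ _).mpr (List.mem_cons_self)
    intro hmap
    rw [List.map_eq_nil_iff] at hmap
    rw [hmap] at hv
    cases hv
  have hmc : PySem.List.sorted (PySem.Dict.counter vals).items (fun kv => kv.2) true ≠ [] := by
    rw [Ne, PySem.List.sorted_eq_nil_iff]
    exact hxs
  obtain ⟨m, t, hmt⟩ := List.exists_cons_of_ne_nil hmc
  rw [hmt]
  have hm : m ∈ (PySem.Dict.counter vals).items := by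
    have : m ∈ PySem.List.sorted (PySem.Dict.counter vals).items (fun kv => kv.2) true := by
      rw [hmt]; exact List.mem_cons_self
    exact (PySem.List.mem_sorted _ _ _ _).mp this
  have hm1 : m.1 ∈ vals := by
    rw [PySem.Dict.items_counter] at hm
    obtain ⟨v, hv, rfl⟩ := List.mem_map.mp hm
    exact (PySem.Set.mem_ofList _ _).mp hv
  simp only [List.getD_cons_zero, List.filter_cons, BEq.rfl, if_true, List.map_cons]
  exact hlow m.1 hm1

-- ---- grouping folds ----

theorem pv_getD_foldl_modify {ν : Type} (f : ν → String → ν) (d0 : ν) (k : String) :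
    ∀ (qs : List (String × String)) (D : PySem.Dict String ν),
      (qs.foldl (fun d q => d.modify q.1 d0 (fun c => f c q.2)) D).getD k d0 =
      ((qs.filter (fun q => q.1 == k)).map (fun q => q.2)).foldl f (D.getD k d0) := by
  intro qs
  induction qs with
  | nil => intro D; rfl
  | cons q t ih =>
    intro D
    simp only [List.foldl_cons, List.filter_cons]
    by_cases h : q.1 = k
    · subst h
      simp only [BEq.rfl, if_true, List.map_cons, List.foldl_cons]
      rw [ih, PySem.Dict.getD_modify_self]
    · have hb : (q.1 == k) = false := beq_eq_false_iff_ne.mpr h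
      simp only [hb, Bool.false_eq_true, if_false]
      rw [ih, PySem.Dict.getD_modify_of_ne _ _ _ (Ne.symm h)]

theorem pv_foldl_discard (qs : List (String × String)) :
    qs.foldl (fun (s : PySem.Set String) (q : String × String) => PySem.Set.discard s q.1)
      PySem.Set.empty = [] := by
  induction qs with
  | nil => rfl
  | cons q t ih => exact ih

theorem pv_foldl_if_filter_map {β γ δ : Type} (p : β → Bool) (f : β → γ) (h : δ → γ → δ) :
    ∀ (l : List β) (i : δ),
      l.foldl (fun g x => if p x then h g (f x) else g) i = ((l.filter p).map f).foldl h i := by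
  intro l
  induction l with
  | nil => intro i; rfl
  | cons x t ih =>
    intro i
    simp only [List.foldl_cons, List.filter_cons]
    by_cases hp : p x
    · simp only [hp, if_true, List.map_cons, List.foldl_cons]
      exact ih _
    · simp only [hp, Bool.false_eq_true, if_false]
      exact ih _

-- ---- the two ports, reshaped onto pvPairs ----

-- A's parsing fold and output pass, named (identical to the port's body)
def pvAfold (its : List String) :
    PySem.Dict String (PySem.Dict String Int) × PySem.Set String :=
  its.foldl
    (fun (st : PySem.Dict String (PySem.Dict String Int) × PySem.Set String) iteration =>
      let pairs := (((PySem.Str.split? (PySem.Str.strip iteration) "\n").getD []).filter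
          (fun line => PySem.Str.isIn "=" line)).map (fun line => PySem.Str.strip line)
      pairs.foldl (fun st pair =>
        let parts := (PySem.Str.splitMax? pair "=" 1).getD []
        let key := PySem.Str.strip (parts.getD 0 "")
        let value := PySem.Str.lower (PySem.Str.strip (parts.getD 1 ""))
        let clean_key := PySem.Str.replace (PySem.Str.replace (PySem.Str.replace
          (PySem.Str.replace (PySem.Str.replace (PySem.Str.replace key "\"" "")
            "'" "") "{" "") "}" "") ")" "") "()" ""
        let clean_value := PySem.Str.replace (PySem.Str.replace (PySem.Str.replace value
          "\"" "") "'" "") "{" ""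
        if clean_value == "NONE" then
          (if st.1.contains clean_key then st else (st.1, PySem.Set.add st.2 clean_key))
        else
          (st.1.modify clean_key PySem.Dict.empty (fun c => c.modify clean_value 0 (· + 1)),
           PySem.Set.discard st.2 clean_key)) st)
    (PySem.Dict.empty, PySem.Set.empty)

def pvAfinal (st : PySem.Dict String (PySem.Dict String Int) × PySem.Set String) :
    List (String × String) :=
  let keyset : PySem.Set String := PySem.Set.union (PySem.Set.ofList st.1.keys) st.2
  (keyset.foldl (fun (out : PySem.Dict String String) key =>
    if PySem.Set.contains st.2 key then out.insert key "NONE"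
    else
      let most_common := PySem.List.sorted (st.1.getD key PySem.Dict.empty).items
        (fun kv => kv.2) true
      let max_count := (most_common.getD 0 ("", 0)).2
      let top_values := (most_common.filter (fun kv => kv.2 == max_count)).map
        (fun kv => PySem.Str.lower kv.1)
      out.insert key (top_values.getD 0 "")) PySem.Dict.empty).items

theorem pv_A_fold (its : List String) :
    pvAfold its = (pvPairs its).foldl pvFA (PySem.Dict.empty, PySem.Set.empty) := by
  rw [pvPairs, List.foldl_map, List.foldl_flatMap]
  unfold pvAfold
  apply PySem.List.foldl_congr_mem
  intro st it _
  rw [List.foldl_map]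
  rfl

theorem pv_pairs_snd (its : List String) :
    ∀ q ∈ pvPairs its, (q.2 == "NONE") = false ∧ PySem.Str.lower q.2 = q.2 := by
  intro q hq
  unfold pvPairs at hq
  obtain ⟨l, _, rfl⟩ := List.mem_map.mp hq
  exact ⟨pv_cleanValue_ne_NONE _, pv_lower_cleanValue _⟩

theorem pv_foldl_pvFA (ps : List (String × String))
    (h : ∀ q ∈ ps, (q.2 == "NONE") = false) :
    ps.foldl pvFA (PySem.Dict.empty, PySem.Set.empty) = (pvC ps, []) := by
  have h1 : ps.foldl pvFA (PySem.Dict.empty, PySem.Set.empty) =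
      ps.foldl (fun (st : PySem.Dict String (PySem.Dict String Int) × PySem.Set String) q =>
        (st.1.modify q.1 PySem.Dict.empty (fun c => c.modify q.2 0 (· + 1)),
         PySem.Set.discard st.2 q.1)) (PySem.Dict.empty, PySem.Set.empty) := by
    apply PySem.List.foldl_congr_mem
    intro st q hq
    unfold pvFA
    rw [h q hq]
    rfl
  rw [h1]
  have h2 := PySem.List.foldl_prod_mk
    (fun (d : PySem.Dict String (PySem.Dict String Int)) (q : String × String) =>
      d.modify q.1 PySem.Dict.empty (fun c => c.modify q.2 0 (· + 1)))
    (fun (s : PySem.Set String) (q : String × String) => PySem.Set.discard s q.1)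
    ps PySem.Dict.empty PySem.Set.empty
  refine h2.trans ?_
  rw [pv_foldl_discard]
  rfl

theorem pv_Afinal_eq (C : PySem.Dict String (PySem.Dict String Int)) :
    pvAfinal (C, ([] : PySem.Set String)) =
      ((PySem.Set.ofList C.keys).foldl
        (fun (out : PySem.Dict String String) k =>
          out.insert k (pvModeA (C.getD k PySem.Dict.empty))) PySem.Dict.empty).items := by
  unfold pvAfinal
  have hu : PySem.Set.union (PySem.Set.ofList C.keys) ([] : PySem.Set String) =
      PySem.Set.ofList C.keys := by
    simp [PySem.Set.union]
  have hc : ∀ k : String, PySem.Set.contains ([] : PySem.Set String) k = false := fun _ => rfl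
  simp only [hu, hc, Bool.false_eq_true, if_false]
  rfl

theorem pv_A_eq (its : List String) :
    get_consistent_vanetype its =
      ((pvC (pvPairs its)).keys.foldl
        (fun (out : PySem.Dict String String) k =>
          out.insert k (pvModeA ((pvC (pvPairs its)).getD k PySem.Dict.empty)))
        PySem.Dict.empty).items := by
  have h0 : get_consistent_vanetype its = pvAfinal (pvAfold its) := rfl
  have hnodup : (pvC (pvPairs its)).keys.Nodup := by
    exact PySem.Dict.nodup_keys_foldl_modify_key (pvPairs its) (fun q => q.1)
      PySem.Dict.empty (fun _ q => fun c => c.modify q.2 0 (· + 1)) PySem.Dict.empty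
      PySem.Dict.nodup_keys_empty
  rw [h0, pv_A_fold, pv_foldl_pvFA _ (fun q hq => (pv_pairs_snd its q hq).1), pv_Afinal_eq,
    PySem.Set.ofList_eq_self_of_nodup _ hnodup]

-- B's gather fold and tally pass, named (identical to the port's body)
def pvBfold (its : List String) : PySem.Dict String (List String) :=
  its.foldl
    (fun (g : PySem.Dict String (List String)) iteration =>
      ((PySem.Str.split? (PySem.Str.strip iteration) "\n").getD []).foldl (fun g line =>
        if PySem.Str.isIn "=" line then
          let parts := (PySem.Str.splitMax? (PySem.Str.strip line) "=" 1).getD []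
          let k := pvCleanKey (PySem.Str.strip (parts.getD 0 ""))
          let v := pvCleanValue (PySem.Str.lower (PySem.Str.strip (parts.getD 1 "")))
          g.modify k [] (fun l => l ++ [v])
        else g) g) PySem.Dict.empty

theorem pv_B_fold (its : List String) : pvBfold its = pvD (pvPairs its) := by
  rw [pvD, pvPairs, List.foldl_map, List.foldl_flatMap]
  unfold pvBfold
  apply PySem.List.foldl_congr_mem
  intro g it _
  show (((PySem.Str.split? (PySem.Str.strip it) "\n").getD []).foldl (fun g x =>
      if PySem.Str.isIn "=" x then
        (fun (g : PySem.Dict String (List String)) (q : String × String) =>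
          g.modify q.1 [] (fun l => l ++ [q.2])) g (pvParse x)
      else g) g) = _
  have h1 := pv_foldl_if_filter_map (fun l => PySem.Str.isIn "=" l) pvParse
    (fun (g : PySem.Dict String (List String)) (q : String × String) =>
      g.modify q.1 [] (fun l => l ++ [q.2]))
    ((PySem.Str.split? (PySem.Str.strip it) "\n").getD []) g
  exact h1.trans List.foldl_map

theorem pv_B_eq (its : List String) :
    get_consistent_vanetype_alt its =
      ((pvD (pvPairs its)).keys.foldl
        (fun (out : PySem.Dict String String) k =>
          out.insert k (pvMode ((pvD (pvPairs its)).getD k [])))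
        PySem.Dict.empty).items := by
  have hnodup : (pvD (pvPairs its)).keys.Nodup := by
    exact PySem.Dict.nodup_keys_foldl_modify_key (pvPairs its) (fun q => q.1)
      [] (fun _ q => fun l => l ++ [q.2]) PySem.Dict.empty PySem.Dict.nodup_keys_empty
  have h0 : get_consistent_vanetype_alt its =
      ((pvBfold its).items.foldl (fun (out : PySem.Dict String String) kv =>
        out.insert kv.1 (pvMode kv.2)) PySem.Dict.empty).items := rfl
  rw [h0, pv_B_fold, PySem.Dict.items_eq_map_keys _ hnodup [], List.foldl_map]

-- ===== VERDICT (by name: the statement is the Claim_ definition above) =====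
theorem get_consistent_vanetype_spec : Claim_equal_get_consistent_vanetype := by
  unfold Claim_equal_get_consistent_vanetype
  intro its _
  unfold Spec_get_consistent_vanetype
  rw [pv_A_eq, pv_B_eq]
  have hkeysC : (pvC (pvPairs its)).keys =
      PySem.Set.ofList ((pvPairs its).map (fun q => q.1)) := by
    have h := PySem.Dict.keys_foldl_modify_key (pvPairs its) (fun q : String × String => q.1)
      (PySem.Dict.empty : PySem.Dict String Int)
      (fun _ q => fun c => c.modify q.2 (0 : Int) (· + 1)) PySem.Dict.empty
    rw [pvC]
    exact h.trans (PySem.Set.update_nil_left _)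
  have hkeysD : (pvD (pvPairs its)).keys =
      PySem.Set.ofList ((pvPairs its).map (fun q => q.1)) := by
    have h := PySem.Dict.keys_foldl_modify_key (pvPairs its) (fun q : String × String => q.1)
      ([] : List String) (fun _ q => fun l => l ++ [q.2]) PySem.Dict.empty
    rw [pvD]
    exact h.trans (PySem.Set.update_nil_left _)
  rw [hkeysC, hkeysD]
  congr 1
  apply PySem.List.foldl_congr_mem
  intro out k hk
  have hk' : k ∈ (pvPairs its).map (fun q => q.1) := (PySem.Set.mem_ofList _ _).mp hk
  obtain ⟨q0, hq0, hq0k⟩ := List.mem_map.mp hk'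
  have hvals : (pvD (pvPairs its)).getD k [] =
      ((pvPairs its).filter (fun q => q.1 == k)).map (fun q => q.2) := by
    rw [pvD, PySem.Dict.getD_foldl_modify_append, PySem.Dict.getD_empty, List.nil_append]
  have hC : (pvC (pvPairs its)).getD k PySem.Dict.empty =
      PySem.Dict.counter (((pvPairs its).filter (fun q => q.1 == k)).map (fun q => q.2)) := by
    have h3 := pv_getD_foldl_modify
      (fun (c : PySem.Dict String Int) (v : String) => c.modify v 0 (· + 1))
      PySem.Dict.empty k (pvPairs its) PySem.Dict.empty
    rw [pvC]
    exact h3.trans (PySem.Dict.counter_eq_foldl _).symm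
  rw [hvals, hC]
  have hne : ((pvPairs its).filter (fun q => q.1 == k)).map (fun q => q.2) ≠ [] := by
    apply List.ne_nil_of_mem (a := q0.2)
    exact List.mem_map.mpr ⟨q0, List.mem_filter.mpr ⟨hq0, by rw [hq0k]; exact BEq.rfl⟩, rfl⟩
  have hlow : ∀ v ∈ ((pvPairs its).filter (fun q => q.1 == k)).map (fun q => q.2),
      PySem.Str.lower v = v := by
    intro v hv
    obtain ⟨q, hq, rfl⟩ := List.mem_map.mp hv
    exact (pv_pairs_snd its q (List.mem_filter.mp hq).1).2
  rw [pv_mode_eq _ hne hlow]
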